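-- pv_equiv track=rewrite | github.com/rafalsiniewicz/coding_challenges | HackerRank/python/Medium/No Idea!/solution.py | happiness
-- ===== SOURCE A (Python) =====
-- def happiness(array, a, b):
--     numbers = {}
--     _happiness = 0
--
--     for i in array:
--         if i in numbers:
--             numbers[i] += 1
--         else:
--             numbers[i] = 1
--     for i in a:
--         if i in numbers:
--             _happiness += numbers[i]
--     for i in b:
--         if i in numbers:
--             _happiness -= numbers[i]
--
--     return _happiness
-- ===== SOURCE B (Python) =====
-- def happiness(array, a, b):
--     # Build multiplicity tables of the liked/disliked sets once,
--     # then a single pass over array accumulates ca[x] - cb[x].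
--     ca = {}
--     for x in a:
--         ca[x] = ca.get(x, 0) + 1
--     cb = {}
--     for x in b:
--         cb[x] = cb.get(x, 0) + 1
--     h = 0
--     for x in array:
--         h += ca.get(x, 0) - cb.get(x, 0)
--     return h
-- ===== Notes on version B (the rewrite author's own statement) =====
-- stated objective: alternative
-- what changed: B counts the query lists a and b into dicts and makes a single accumulating pass over array (happiness += ca[x]-cb[x]), instead of counting array into a dict and scanning a then b against it.
import Mathlib
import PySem

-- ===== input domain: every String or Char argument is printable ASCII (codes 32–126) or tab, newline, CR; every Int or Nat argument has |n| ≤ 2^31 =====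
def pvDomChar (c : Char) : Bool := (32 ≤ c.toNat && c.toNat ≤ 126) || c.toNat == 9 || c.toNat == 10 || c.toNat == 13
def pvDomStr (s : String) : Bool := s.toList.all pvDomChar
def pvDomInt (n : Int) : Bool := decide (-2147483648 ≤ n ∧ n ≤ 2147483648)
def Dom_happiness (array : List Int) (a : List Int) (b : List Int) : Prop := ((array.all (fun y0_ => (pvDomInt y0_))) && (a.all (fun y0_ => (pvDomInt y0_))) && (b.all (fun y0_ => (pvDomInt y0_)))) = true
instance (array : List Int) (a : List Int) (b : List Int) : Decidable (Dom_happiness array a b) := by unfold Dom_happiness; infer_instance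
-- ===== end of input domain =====

-- B counts the query lists a and b into dicts and makes one accumulating pass over
-- array (h += ca[x]-cb[x]) instead of counting array and scanning a then b; alternative decomposition, same cost.


-- ===== PORT A =====
def happiness (array : List Int) (a : List Int) (b : List Int) : Int :=
  let numbers : PySem.Dict Int Int :=
    array.foldl (fun d i => if d.contains i then d.modify i 0 (· + 1) else d.insert i 1)
      PySem.Dict.empty
  let h1 : Int :=
    a.foldl (fun acc i => if numbers.contains i then acc + numbers.getD i 0 else acc) 0
  b.foldl (fun acc i => if numbers.contains i then acc - numbers.getD i 0 else acc) h1

-- ===== PORT B =====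
def happiness_alt (array : List Int) (a : List Int) (b : List Int) : Int :=
  let ca : PySem.Dict Int Int :=
    a.foldl (fun d x => d.insert x (d.getD x 0 + 1)) PySem.Dict.empty
  let cb : PySem.Dict Int Int :=
    b.foldl (fun d x => d.insert x (d.getD x 0 + 1)) PySem.Dict.empty
  array.foldl (fun h x => h + (ca.getD x 0 - cb.getD x 0)) 0

-- ===== PRECONDITION & SPEC =====
def Spec_happiness (array : List Int) (a : List Int) (b : List Int) (out : Int) : Prop := out = happiness_alt array a b
instance (array : List Int) (a : List Int) (b : List Int) (out : Int) : Decidable (Spec_happiness array a b out) := by unfold Spec_happiness; infer_instance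

-- ===== CLAIM (what is proved, stated in full; the proofs are below) =====
def Claim_equal_happiness : Prop := ∀ (array : List Int) (a : List Int) (b : List Int), Dom_happiness array a b → Spec_happiness array a b (happiness array a b)

-- ===== LEMMAS AND PROOFS =====

-- A's counter-building loop: values are occurrence counts of the scanned elements.
theorem buildA_getD (l : List Int) (d : PySem.Dict Int Int) (v : Int) :
    (l.foldl (fun d i => if d.contains i then d.modify i 0 (· + 1) else d.insert i 1) d).getD v 0
      = d.getD v 0 + l.count v := by
  induction l generalizing d with
  | nil => simp
  | cons x t ih =>
    simp only [List.foldl_cons]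
    by_cases hx : d.contains x
    · rw [if_pos hx, ih, PySem.Dict.getD_modify]
      rcases eq_or_ne v x with rfl | hvx
      · simp; ring
      · simp [hvx, Ne.symm hvx]
    · rw [if_neg hx, ih, PySem.Dict.getD_insert]
      rcases eq_or_ne v x with rfl | hvx
      · have hx' : d.contains v = false := by simpa using hx
        simp [PySem.Dict.getD_of_not_contains, hx']
        ring
      · simp [hvx, Ne.symm hvx]

-- A's counter-building loop: keys are exactly the scanned elements (plus what was there).
theorem buildA_contains (l : List Int) (d : PySem.Dict Int Int) (v : Int) :
    (l.foldl (fun d i => if d.contains i then d.modify i 0 (· + 1) else d.insert i 1) d).contains v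
      = (d.contains v || decide (v ∈ l)) := by
  induction l generalizing d with
  | nil => simp
  | cons x t ih =>
    simp only [List.foldl_cons]
    by_cases hx : d.contains x
    · rw [if_pos hx, ih, PySem.Dict.contains_modify]
      rcases eq_or_ne v x with rfl | hvx
      · simp [hx]
      · rw [beq_eq_false_iff_ne.mpr hvx]
        simp [hvx]
    · rw [if_neg hx, ih, PySem.Dict.contains_insert]
      rcases eq_or_ne v x with rfl | hvx
      · simp
      · rw [beq_eq_false_iff_ne.mpr hvx]
        simp [hvx]

-- Σ_{i∈l} [i = x] = l.count x (over ℤ)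
theorem sum_indicator_count (l : List Int) (x : Int) :
    ((l.map fun i => if i = x then (1 : Int) else 0).sum) = (l.count x : Int) := by
  induction l with
  | nil => simp
  | cons y t ih =>
    rcases eq_or_ne y x with rfl | hyx
    · simp [ih]
      ring
    · simp [hyx, ih]

-- the double count of matching pairs, both ways round
theorem sum_count_comm (l m : List Int) :
    ((l.map fun i => (m.count i : Int)).sum) = ((m.map fun x => (l.count x : Int)).sum) := by
  induction m with
  | nil => simp
  | cons x t ih =>
    have hsplit : (l.map fun i => ((x :: t).count i : Int))
        = l.map (fun i => (t.count i : Int) + if i = x then (1 : Int) else 0) := by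
      apply List.map_congr_left
      intro i _
      rcases eq_or_ne i x with rfl | h
      · simp
      · simp [h, Ne.symm h]
    rw [hsplit]
    have hsum : (l.map (fun i => (t.count i : Int) + if i = x then (1 : Int) else 0)).sum
        = ((l.map fun i => (t.count i : Int)).sum) + ((l.map fun i => if i = x then (1 : Int) else 0).sum) := by
      induction l with
      | nil => simp
      | cons y u ihl => simp; ring
    rw [hsum, ih, sum_indicator_count]
    simp
    ring

-- pointwise sums and negations distribute over map-sum
theorem sum_map_sub (f g : Int → Int) (l : List Int) :
    (l.map fun x => f x - g x).sum = (l.map f).sum - (l.map g).sum := by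
  induction l with
  | nil => simp
  | cons y t ih => simp [ih]; ring

theorem sum_map_neg (f : Int → Int) (l : List Int) :
    (l.map fun x => -f x).sum = -(l.map f).sum := by
  induction l with
  | nil => simp
  | cons y t ih => simp [ih]; ring

-- two folds with pointwise-equal step functions agree
theorem foldl_ext (f g : Int → Int → Int) (h : ∀ acc x, f acc x = g acc x) (l : List Int) (init : Int) :
    l.foldl f init = l.foldl g init := by
  induction l generalizing init with
  | nil => rfl
  | cons x t ih => simp only [List.foldl_cons, h, ih]

-- a fold that only accumulates is the initial value plus a sum
theorem foldl_add_map (f : Int → Int) (l : List Int) (h : Int) :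
    l.foldl (fun acc i => acc + f i) h = h + (l.map f).sum := by
  induction l generalizing h with
  | nil => simp
  | cons x t ih => simp [ih]; ring

-- ===== VERDICT (by name: the statement is the Claim_ definition above) =====
theorem happiness_spec : Claim_equal_happiness := by
  intro array a b _
  show happiness array a b = happiness_alt array a b
  unfold happiness happiness_alt
  have hget : ∀ v : Int, (array.foldl (fun d i => if d.contains i then d.modify i 0 (· + 1) else d.insert i 1) (PySem.Dict.empty : PySem.Dict Int Int)).getD v 0 = (array.count v : Int) := by
    intro v; rw [buildA_getD]; simp
  have hcont : ∀ v : Int, (array.foldl (fun d i => if d.contains i then d.modify i 0 (· + 1) else d.insert i 1) (PySem.Dict.empty : PySem.Dict Int Int)).contains v = decide (v ∈ array) := by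
    intro v; rw [buildA_contains]; simp
  -- both A-side scans add / subtract array.count i (the count is 0 off-membership, so the guard is harmless)
  have hstepA : ∀ (acc i : Int),
      (if (array.foldl (fun d i => if d.contains i then d.modify i 0 (· + 1) else d.insert i 1) (PySem.Dict.empty : PySem.Dict Int Int)).contains i then acc + (array.foldl (fun d i => if d.contains i then d.modify i 0 (· + 1) else d.insert i 1) (PySem.Dict.empty : PySem.Dict Int Int)).getD i 0 else acc)
        = acc + (array.count i : Int) := by
    intro acc i
    rw [hcont, hget]
    by_cases hi : i ∈ array
    · simp [hi]
    · simp [hi, List.count_eq_zero_of_not_mem hi]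
  have hstepA' : ∀ (acc i : Int),
      (if (array.foldl (fun d i => if d.contains i then d.modify i 0 (· + 1) else d.insert i 1) (PySem.Dict.empty : PySem.Dict Int Int)).contains i then acc - (array.foldl (fun d i => if d.contains i then d.modify i 0 (· + 1) else d.insert i 1) (PySem.Dict.empty : PySem.Dict Int Int)).getD i 0 else acc)
        = acc + (-(array.count i : Int)) := by
    intro acc i
    rw [hcont, hget]
    by_cases hi : i ∈ array
    · simp [hi]; ring
    · simp [hi, List.count_eq_zero_of_not_mem hi]
  rw [foldl_ext _ _ hstepA' b, foldl_ext _ _ hstepA a, foldl_add_map, foldl_add_map]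
  -- B's loops build counters
  have hB : ∀ (x : Int),
      ((a.foldl (fun d x => d.insert x (d.getD x 0 + 1)) (PySem.Dict.empty : PySem.Dict Int Int)).getD x 0
        - (b.foldl (fun d x => d.insert x (d.getD x 0 + 1)) (PySem.Dict.empty : PySem.Dict Int Int)).getD x 0)
        = ((a.count x : Int) - (b.count x : Int)) := by
    intro x
    rw [PySem.Dict.getD_foldl_insert_add_one, PySem.Dict.getD_foldl_insert_add_one]
    simp
  rw [foldl_ext _ _ (fun acc x => by rw [hB]) array, foldl_add_map,
      sum_map_sub (fun x => (a.count x : Int)) (fun x => (b.count x : Int)) array,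
      ← sum_count_comm a array, ← sum_count_comm b array,
      sum_map_neg (fun x => (array.count x : Int)) b]
  ring
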